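-- pv_equiv track=rewrite | github.com/Ruanrodrigues20/p1 | uni_06/char unico.py | char_unico
-- ===== SOURCE A (Python) =====
-- def char_unico(string):
--     contador = {}
--
--     for i in range(len(string)):
--         if not string[i] in contador:
--             contador[string[i]] = 1
--         else:
--             contador[string[i]] += 1
--
--     s = ''
--     for e in contador.keys():
--         if contador[e] == 1:
--             s += e
--     return s
-- ===== SOURCE B (Python) =====
-- def char_unico(string):
--     return ''.join(c for c in string if string.count(c) == 1)
-- ===== Notes on version B (the rewrite author's own statement) =====
-- stated objective: idiomatic
-- what changed: Replaces A's two-phase dict counting table (build counter, then scan its keys) with a single comprehension over the string that keeps each character whose str.count over the whole string is 1.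
import Mathlib
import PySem

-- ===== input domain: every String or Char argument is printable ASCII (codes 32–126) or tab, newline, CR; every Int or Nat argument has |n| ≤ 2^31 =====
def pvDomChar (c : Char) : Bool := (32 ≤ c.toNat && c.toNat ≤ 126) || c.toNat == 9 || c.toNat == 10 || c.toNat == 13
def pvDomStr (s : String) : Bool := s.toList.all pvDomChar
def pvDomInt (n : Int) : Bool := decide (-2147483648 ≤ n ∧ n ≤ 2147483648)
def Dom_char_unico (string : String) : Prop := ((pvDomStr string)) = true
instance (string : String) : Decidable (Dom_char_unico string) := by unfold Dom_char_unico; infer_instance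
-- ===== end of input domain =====

-- B keeps each character whose count over the whole string is 1 (idiomatic one-liner); A builds a dict table first.

-- ===== PORT A =====
-- the body of A's first for-loop (insert-or-increment on the dict)
def charUnicoStep (d : PySem.Dict Char Int) (c : Char) : PySem.Dict Char Int :=
  if !(d.contains c) then d.insert c 1 else d.insert c (d.getD c 0 + 1)

def char_unico (string : String) : String :=
  let contador := (PySem.List.pyRange 0 (PySem.Str.len string)).foldl
      (fun d i => charUnicoStep d (PySem.List.pyGetD string.toList i ' '))
      PySem.Dict.empty
  String.ofList (contador.keys.foldl
      (fun s e => if contador.getD e 0 == 1 then s ++ [e] else s) [])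

-- ===== PORT B =====
def char_unico_alt (string : String) : String :=
  PySem.Str.join ""
    ((string.toList.filter
        (fun c => PySem.Str.count string (String.ofList [c]) == 1)).map
      (fun c => String.ofList [c]))

-- ===== PRECONDITION & SPEC =====
def Spec_char_unico (string : String) (out : String) : Prop := out = char_unico_alt string
instance (string : String) (out : String) : Decidable (Spec_char_unico string out) := by unfold Spec_char_unico; infer_instance

-- ===== CLAIM (what is proved, stated in full; the proofs are below) =====
def Claim_equal_char_unico : Prop := ∀ (string : String), Dom_char_unico string → Spec_char_unico string (char_unico string)

-- ===== LEMMAS AND PROOFS =====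

-- Python s.count(c) for a single character c is List.count
theorem charsCountGo_singleton (c : Char) :
    ∀ (fuel : Nat) (l : List Char) (acc : Nat), l.length ≤ fuel →
      PySem.Chars.count.go [c] fuel l acc = acc + l.count c := by
  intro fuel
  induction fuel with
  | zero =>
    intro l acc h
    have : l = [] := List.eq_nil_of_length_eq_zero (Nat.le_zero.mp h)
    subst this; simp [PySem.Chars.count.go]
  | succ n ih =>
    intro l acc h
    cases l with
    | nil => simp [PySem.Chars.count.go]
    | cons x t =>
      simp only [PySem.Chars.count.go]
      by_cases hx : x = c
      · subst hx
        simp only [List.isPrefixOf, beq_self_eq_true, Bool.true_and, if_pos]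
        have hd : List.drop ([x].length) (x :: t) = t := by simp
        rw [hd, ih t (acc + 1) (by simpa using Nat.le_of_succ_le_succ (by simpa using h))]
        simp
        omega
      · have hbeq : (c == x) = false := by
          simp only [beq_eq_false_iff_ne, ne_eq]
          exact fun h' => hx h'.symm
        simp only [List.isPrefixOf, hbeq, Bool.false_and, Bool.false_eq_true, if_neg,
          not_false_eq_true]
        rw [ih t acc (by simpa using Nat.le_of_succ_le_succ (by simpa using h))]
        simp [List.count_cons]
        all_goals exact hx

theorem charsCount_singleton (l : List Char) (c : Char) :
    PySem.Chars.count l [c] = l.count c := by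
  simp only [PySem.Chars.count, List.isEmpty_cons, if_neg, Bool.false_eq_true, not_false_eq_true]
  simpa using charsCountGo_singleton c l.length l 0 (Nat.le_refl _)

-- folding Set.add over a list and then filtering by a predicate that only holds
-- for elements of total count ≤ 1 is the same as filtering the list itself
theorem foldl_setAdd_filter (p : Char → Bool) :
    ∀ (cs acc : List Char),
      (∀ c, p c = true → acc.count c + cs.count c ≤ 1) →
      (cs.foldl PySem.Set.add acc).filter p = acc.filter p ++ cs.filter p := by
  intro cs
  induction cs with
  | nil => intro acc _; simp
  | cons x t ih =>
    intro acc h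
    simp only [List.foldl_cons]
    by_cases hx : PySem.Set.contains acc x = true
    · have hmem : x ∈ acc := by
        simpa [PySem.Set.contains] using hx
      have hpx : p x = false := by
        by_contra hp
        have hp' : p x = true := by simpa using hp
        have h1 : 1 ≤ acc.count x := List.one_le_count_iff.mpr hmem
        have h2 := h x hp'
        simp at h2
        omega
      have hadd : PySem.Set.add acc x = acc := by simp [PySem.Set.add, hmem]
      rw [hadd, ih acc (by
        intro c hc
        have := h c hc
        simp [List.count_cons] at this
        omega)]
      simp [hpx]
    · have hnmem : x ∉ acc := fun hm =>
        hx (by simp only [PySem.Set.contains, List.contains_iff_mem]; exact hm)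
      have hadd : PySem.Set.add acc x = acc ++ [x] := by simp [PySem.Set.add, hnmem]
      rw [hadd, ih (acc ++ [x]) (by
        intro c hc
        have := h c hc
        simp [List.count_append, List.count_cons] at *
        omega)]
      simp [List.filter_append, List.filter_cons]
      by_cases hpx : p x = true <;> simp [hpx]

theorem intCast_beq_one (n : Nat) : ((n : Int) == (1 : Int)) = (n == 1) := by
  by_cases h : n = 1
  · subst h; decide
  · have h2 : ((n : Int) == 1) = false := beq_eq_false_iff_ne.mpr (by intro hh; omega)
    have h3 : (n == 1) = false := beq_eq_false_iff_ne.mpr h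
    rw [h2, h3]

theorem char_unico_eq_filter (string : String) :
    char_unico string =
      String.ofList (string.toList.filter (fun c => string.toList.count c == 1)) := by
  unfold char_unico
  have hlen : PySem.Str.len string = PySem.List.len string.toList := by
    simp [PySem.Str.len, PySem.List.len]
  rw [hlen,
    PySem.List.foldl_pyRange_pyGetD string.toList ' ' charUnicoStep PySem.Dict.empty
      (Int.le_refl 0)]
  simp only [Int.toNat_zero, List.drop_zero]
  have hstep : List.foldl charUnicoStep PySem.Dict.empty string.toList
      = PySem.Dict.counter string.toList := by
    rw [PySem.List.foldl_congr_mem string.toList charUnicoStep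
      (fun d x => d.insert x (d.getD x 0 + 1)) PySem.Dict.empty ?_]
    · exact PySem.Dict.foldl_insert_getD_add_one_eq_counter string.toList
    · intro d x _
      show charUnicoStep d x = d.insert x (d.getD x 0 + 1)
      unfold charUnicoStep
      by_cases hc : d.contains x = true
      · simp [hc]
      · have hc' : d.contains x = false := by simpa using hc
        rw [if_pos (by simp [hc']), PySem.Dict.getD_of_not_contains d 0 hc']
        simp
  simp only [hstep]
  rw [PySem.List.foldl_append_if_eq_filter
    (fun e => (PySem.Dict.counter string.toList).getD e 0 == 1)
    (PySem.Dict.counter string.toList).keys []]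
  rw [PySem.Dict.keys_counter]
  have hp : ∀ c ∈ PySem.Set.ofList string.toList,
      ((PySem.Dict.counter string.toList).getD c 0 == 1)
        = (string.toList.count c == 1) := by
    intro c _
    rw [PySem.Dict.getD_counter]
    exact intCast_beq_one _
  rw [List.filter_congr hp]
  have hfold := foldl_setAdd_filter (fun c => string.toList.count c == 1)
    string.toList [] (by intro c hc; simp at hc; simp [hc])
  simp only [PySem.Set.ofList, PySem.Set.empty, List.filter_nil, List.nil_append] at hfold ⊢
  rw [hfold]

theorem char_unico_alt_eq_filter (string : String) :
    char_unico_alt string =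
      String.ofList (string.toList.filter (fun c => string.toList.count c == 1)) := by
  unfold char_unico_alt
  apply String.toList_inj.mp
  simp only [PySem.Str.join, String.toList_ofList, List.map_map]
  have hmap : (List.map (String.toList ∘ fun c => String.ofList [c])
      (string.toList.filter (fun c => PySem.Str.count string (String.ofList [c]) == 1)))
      = (string.toList.filter (fun c => PySem.Str.count string (String.ofList [c]) == 1)).map
          (fun c => [c]) := by
    apply List.map_congr_left
    intro c _
    simp
  rw [hmap, show "".toList = ([] : List Char) by simp, PySem.Chars.join_nil_singletons]
  apply List.filter_congr
  intro c _
  rw [PySem.Str.count_eq]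
  simp only [String.toList_ofList]
  rw [charsCount_singleton]

-- ===== VERDICT (by name: the statement is the Claim_ definition above) =====
theorem char_unico_spec : Claim_equal_char_unico := by
  intro string _
  unfold Spec_char_unico
  rw [char_unico_eq_filter, char_unico_alt_eq_filter]
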